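-- pv_equiv track=rewrite | github.com/JPab-Dev/Sortify | Sortify/Metodos_Ordenamiento/Radix_Sort.py | radix_sort_estudio
-- ===== SOURCE A (Python) =====
-- def radix_sort_estudio(lista):
--     pasos = 0
--     if len(lista) == 0:
--         return pasos
--
--     max_num = max(lista)
--     exp = 1
--     n = len(lista)
--
--     while max_num // exp > 0:
--         count = [0] * 10
--         output = [0] * n
--
--         for i in range(n):
--             index = lista[i] // exp
--             count[index % 10] += 1
--             pasos += 1
--
--         for i in range(1, 10):
--             count[i] += count[i - 1]
--             pasos += 1
--
--         for i in range(n - 1, -1, -1):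
--             index = lista[i] // exp
--             output[count[index % 10] - 1] = lista[i]
--             count[index % 10] -= 1
--             pasos += 2
--
--         for i in range(n):
--             lista[i] = output[i]
--             pasos += 1
--
--         exp *= 10
--
--     return pasos
-- ===== SOURCE B (Python) =====
-- def radix_sort_estudio(lista):
--     # Closed form: each radix pass adds exactly 4*n + 9 steps, and the number of
--     # passes is the number of decimal digits of max(lista) (0 if max <= 0).
--     # Note: A sorts lista in place; this claim is about the RETURN value only.
--     if len(lista) == 0:
--         return 0
--     m = max(lista)
--     d = 0
--     while m >= 1:
--         d += 1
--         m //= 10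
--     return (4 * len(lista) + 9) * d
-- ===== Notes on version B (the rewrite author's own statement) =====
-- stated objective: faster
-- what changed: Replaces the full radix-sort simulation with a closed form: one max scan, a digit count of the max, and the formula (4n+9)*digits, since every pass adds exactly 4n+9 steps.
import Mathlib
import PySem

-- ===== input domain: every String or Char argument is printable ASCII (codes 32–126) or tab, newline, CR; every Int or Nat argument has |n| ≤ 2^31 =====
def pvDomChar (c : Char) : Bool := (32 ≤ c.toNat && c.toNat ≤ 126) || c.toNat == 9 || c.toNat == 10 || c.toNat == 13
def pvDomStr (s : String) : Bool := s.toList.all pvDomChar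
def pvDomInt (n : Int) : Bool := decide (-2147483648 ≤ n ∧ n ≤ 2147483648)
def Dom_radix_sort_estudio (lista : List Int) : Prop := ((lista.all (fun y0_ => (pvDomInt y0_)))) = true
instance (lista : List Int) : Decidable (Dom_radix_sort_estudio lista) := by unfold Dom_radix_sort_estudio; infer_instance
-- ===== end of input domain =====

-- B replaces A's full radix-sort simulation by the closed form (4n+9)*digits(max).
-- A sorts `lista` in place in Python; the equivalence claimed here is about the RETURN value only.

-- ===== PORT A =====

-- termination helper for A's while loop (cited by name in decreasing_by)
theorem pvFloordivPowSuccLt (m : Int) (k : Nat)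
    (h : 0 < PySem.Int.floordiv m (10 ^ k)) :
    (PySem.Int.floordiv m (10 ^ (k + 1))).toNat < (PySem.Int.floordiv m (10 ^ k)).toNat := by
  have he : (0:Int) < 10 ^ k := by positivity
  have he' : (0:Int) < 10 ^ (k + 1) := by positivity
  rw [PySem.Int.floordiv_eq_ediv_of_pos he] at h ⊢
  rw [PySem.Int.floordiv_eq_ediv_of_pos he']
  have h1 : m / 10 ^ (k + 1) = m / 10 ^ k / 10 := by
    rw [pow_succ, ← Int.ediv_ediv_of_nonneg he.le]
  rw [h1]
  omega

-- A's while loop; `exp` is tracked as the exponent k (exp = 10^k, `exp *= 10` is k+1).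
def aWhile (max_num : Int) (n : Nat) (lista : List Int) (pasos : Int) (k : Nat) : Int :=
  if h : 0 < PySem.Int.floordiv max_num (10 ^ k) then
    let exp : Int := 10 ^ k
    let count : List Int := List.replicate 10 0
    let output : List Int := List.replicate n 0
    -- for i in range(n): count[(lista[i]//exp) % 10] += 1; pasos += 1
    let s1 := (List.range n).foldl (fun (s : List Int × Int) i =>
        let index := PySem.Int.floordiv (lista.getD i 0) exp
        let j := (PySem.Int.mod index 10).toNat
        (s.1.set j (s.1.getD j 0 + 1), s.2 + 1)) (count, pasos)
    -- for i in range(1, 10): count[i] += count[i-1]; pasos += 1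
    let s2 := (List.range 9).foldl (fun (s : List Int × Int) i =>
        (s.1.set (i + 1) (s.1.getD (i + 1) 0 + s.1.getD i 0), s.2 + 1)) s1
    -- for i in range(n-1, -1, -1): output[count[j]-1] = lista[i]; count[j] -= 1; pasos += 2
    let s3 := (List.range n).reverse.foldl (fun (s : (List Int × List Int) × Int) i =>
        let index := PySem.Int.floordiv (lista.getD i 0) exp
        let j := (PySem.Int.mod index 10).toNat
        let c := s.1.1.getD j 0
        ((s.1.1.set j (c - 1), s.1.2.set (c - 1).toNat (lista.getD i 0)), s.2 + 2))
        ((s2.1, output), s2.2)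
    -- for i in range(n): lista[i] = output[i]; pasos += 1
    let s4 := (List.range n).foldl (fun (s : List Int × Int) i =>
        (s.1.set i (s3.1.2.getD i 0), s.2 + 1)) (lista, s3.2)
    aWhile max_num n s4.1 s4.2 (k + 1)
  else pasos
termination_by (PySem.Int.floordiv max_num (10 ^ k)).toNat
decreasing_by exact pvFloordivPowSuccLt max_num k h

def radix_sort_estudio (lista : List Int) : Int :=
  if lista.length = 0 then 0
  else
    -- lista is nonempty here, so max? is some; getD 0 only supplies the unreachable default
    let max_num := (PySem.List.max? lista (fun x => x)).getD 0
    aWhile max_num lista.length lista 0 0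

-- ===== PORT B =====

-- B's digit-count loop: while m >= 1: d += 1; m //= 10
def dLoop (m : Int) (d : Int) : Int :=
  if h : 1 ≤ m then dLoop (PySem.Int.floordiv m 10) (d + 1) else d
termination_by m.toNat
decreasing_by
  rw [PySem.Int.floordiv_eq_ediv_of_pos (by norm_num : (0:Int) < 10)]
  omega

def radix_sort_estudio_alt (lista : List Int) : Int :=
  if lista.length = 0 then 0
  else
    let m := (PySem.List.max? lista (fun x => x)).getD 0
    let d := dLoop m 0
    (4 * (lista.length : Int) + 9) * d

-- ===== PRECONDITION & SPEC =====
def Spec_radix_sort_estudio (lista : List Int) (out : Int) : Prop := out = radix_sort_estudio_alt lista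
instance (lista : List Int) (out : Int) : Decidable (Spec_radix_sort_estudio lista out) := by unfold Spec_radix_sort_estudio; infer_instance

-- ===== CLAIM (what is proved, stated in full; the proofs are below) =====
def Claim_equal_radix_sort_estudio : Prop := ∀ (lista : List Int), Dom_radix_sort_estudio lista → Spec_radix_sort_estudio lista (radix_sort_estudio lista)

-- ===== LEMMAS AND PROOFS =====

-- a fold whose step adds the constant c to the Int component adds c * length overall
theorem foldl_snd_const {α β : Type} (g : α × Int → β → α × Int) (c : Int)
    (h : ∀ s i, (g s i).2 = s.2 + c) :
    ∀ (l : List β) (s : α × Int), (l.foldl g s).2 = s.2 + c * l.length := by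
  intro l
  induction l with
  | nil => intro s; simp
  | cons b t ih =>
    intro s
    simp only [List.foldl_cons, ih (g s b), h s b, List.length_cons]
    push_cast
    ring

theorem snd_loop1 (lista : List Int) (exp : Int) (l : List Nat) (s : List Int × Int) :
    (l.foldl (fun (s : List Int × Int) i =>
        let index := PySem.Int.floordiv (lista.getD i 0) exp
        let j := (PySem.Int.mod index 10).toNat
        (s.1.set j (s.1.getD j 0 + 1), s.2 + 1)) s).2 = s.2 + l.length := by
  simpa using foldl_snd_const _ 1 (fun s i => rfl) l s

theorem snd_loop2 (l : List Nat) (s : List Int × Int) :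
    (l.foldl (fun (s : List Int × Int) i =>
        (s.1.set (i + 1) (s.1.getD (i + 1) 0 + s.1.getD i 0), s.2 + 1)) s).2 = s.2 + l.length := by
  simpa using foldl_snd_const _ 1 (fun s i => rfl) l s

theorem snd_loop3 (lista : List Int) (exp : Int) (l : List Nat) (s : (List Int × List Int) × Int) :
    (l.foldl (fun (s : (List Int × List Int) × Int) i =>
        let index := PySem.Int.floordiv (lista.getD i 0) exp
        let j := (PySem.Int.mod index 10).toNat
        let c := s.1.1.getD j 0
        ((s.1.1.set j (c - 1), s.1.2.set (c - 1).toNat (lista.getD i 0)), s.2 + 2)) s).2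
      = s.2 + 2 * l.length := by
  simpa using foldl_snd_const _ 2 (fun s i => rfl) l s

theorem snd_loop4 (out : List Int) (l : List Nat) (s : List Int × Int) :
    (l.foldl (fun (s : List Int × Int) i =>
        (s.1.set i (out.getD i 0), s.2 + 1)) s).2 = s.2 + l.length := by
  simpa using foldl_snd_const _ 1 (fun s i => rfl) l s

theorem dLoop_shift_aux : ∀ (N : Nat) (m : Int), m.toNat ≤ N → ∀ d, dLoop m d = dLoop m 0 + d := by
  intro N
  induction N with
  | zero =>
    intro m hm d
    have h : ¬ 1 ≤ m := by omega
    conv_lhs => rw [dLoop]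
    conv_rhs => rw [dLoop]
    rw [dif_neg h, dif_neg h]
    ring
  | succ N ih =>
    intro m hm d
    by_cases h : 1 ≤ m
    · have hd : PySem.Int.floordiv m 10 = m / 10 :=
        PySem.Int.floordiv_eq_ediv_of_pos (by norm_num)
      have hmeas : (PySem.Int.floordiv m 10).toNat ≤ N := by rw [hd]; omega
      conv_lhs => rw [dLoop]
      conv_rhs => rw [dLoop]
      rw [dif_pos h, dif_pos h]
      rw [ih _ hmeas (d + 1), ih _ hmeas (0 + 1)]
      ring
    · conv_lhs => rw [dLoop]
      conv_rhs => rw [dLoop]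
      rw [dif_neg h, dif_neg h]
      ring

theorem dLoop_shift (m d : Int) : dLoop m d = dLoop m 0 + d :=
  dLoop_shift_aux m.toNat m le_rfl d

theorem floordiv_pow_succ (m : Int) (k : Nat) :
    PySem.Int.floordiv m (10 ^ (k + 1)) = PySem.Int.floordiv (PySem.Int.floordiv m (10 ^ k)) 10 := by
  have he : (0:Int) < 10 ^ k := by positivity
  have he' : (0:Int) < 10 ^ (k + 1) := by positivity
  rw [PySem.Int.floordiv_eq_ediv_of_pos he, PySem.Int.floordiv_eq_ediv_of_pos he',
    PySem.Int.floordiv_eq_ediv_of_pos (by norm_num : (0:Int) < 10), pow_succ,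
    ← Int.ediv_ediv_of_nonneg he.le]

theorem aWhile_eq_aux (max_num : Int) (n : Nat) :
    ∀ (N k : Nat), (PySem.Int.floordiv max_num (10 ^ k)).toNat ≤ N →
      ∀ (lista : List Int) (pasos : Int),
        aWhile max_num n lista pasos k
          = pasos + (4 * (n : Int) + 9) * dLoop (PySem.Int.floordiv max_num (10 ^ k)) 0 := by
  intro N
  induction N with
  | zero =>
    intro k hk lista pasos
    rw [aWhile, dLoop]
    rw [dif_neg (by omega), dif_neg (by omega)]
    ring
  | succ N ih =>
    intro k hk lista pasos
    by_cases h : 0 < PySem.Int.floordiv max_num (10 ^ k)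
    · have hmeas : (PySem.Int.floordiv max_num (10 ^ (k + 1))).toNat ≤ N := by
        have := pvFloordivPowSuccLt max_num k h
        omega
      rw [aWhile]
      rw [dif_pos h]
      rw [ih (k + 1) hmeas]
      rw [snd_loop4, snd_loop3, snd_loop2, snd_loop1]
      rw [floordiv_pow_succ]
      conv_rhs => rw [dLoop]
      rw [dif_pos (by omega : 1 ≤ PySem.Int.floordiv max_num (10 ^ k))]
      rw [dLoop_shift (PySem.Int.floordiv (PySem.Int.floordiv max_num (10 ^ k)) 10) (0 + 1)]
      simp only [List.length_range, List.length_reverse]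
      push_cast
      ring
    · rw [aWhile, dLoop]
      rw [dif_neg h, dif_neg (by omega)]
      ring

theorem aWhile_eq (max_num : Int) (n : Nat) (lista : List Int) (pasos : Int) :
    aWhile max_num n lista pasos 0
      = pasos + (4 * (n : Int) + 9) * dLoop max_num 0 := by
  have h1 : PySem.Int.floordiv max_num (10 ^ 0) = max_num := by
    rw [pow_zero, PySem.Int.floordiv_eq_ediv_of_pos (by norm_num : (0:Int) < 1), Int.ediv_one]
  rw [aWhile_eq_aux max_num n (PySem.Int.floordiv max_num (10 ^ 0)).toNat 0 le_rfl, h1]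

-- ===== VERDICT (by name: the statement is the Claim_ definition above) =====
theorem radix_sort_estudio_spec : Claim_equal_radix_sort_estudio := by
  intro lista _
  unfold Spec_radix_sort_estudio radix_sort_estudio radix_sort_estudio_alt
  by_cases hl : lista.length = 0
  · simp [hl]
  · simp only [hl, if_false]
    rw [aWhile_eq]
    ring
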